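-- pv_equiv track=rewrite | github.com/niru0215/Assignment6 | bitwise_operations.py | perform_bitwise_operations
-- ===== SOURCE A (Python) =====
-- def perform_bitwise_operations(numbers):
--     bitwise_and = numbers[0]
--     bitwise_or = numbers[0]
--     bitwise_xor = numbers[0]
--
--     for num in numbers[1:]:
--         bitwise_and &= num
--         bitwise_or |= num
--         bitwise_xor ^= num
--
--     return bitwise_and, bitwise_or, bitwise_xor
-- ===== SOURCE B (Python) =====
-- def _reduce3(xs):
--     # balanced divide-and-conquer: combine the (AND, OR, XOR) triples of the two halves
--     if len(xs) == 1:
--         return (xs[0], xs[0], xs[0])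
--     mid = len(xs) // 2
--     a1, o1, x1 = _reduce3(xs[:mid])
--     a2, o2, x2 = _reduce3(xs[mid:])
--     return (a1 & a2, o1 | o2, x1 ^ x2)
--
--
-- def perform_bitwise_operations(numbers):
--     return _reduce3(list(numbers))
-- ===== Notes on version B (the rewrite author's own statement) =====
-- stated objective: alternative
-- what changed: Replaces A's single left-to-right loop carrying three accumulators with a balanced divide-and-conquer: the list is split in half recursively and the (AND, OR, XOR) triples of the halves are combined, correct because &, | and ^ are associative.
import Mathlib
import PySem

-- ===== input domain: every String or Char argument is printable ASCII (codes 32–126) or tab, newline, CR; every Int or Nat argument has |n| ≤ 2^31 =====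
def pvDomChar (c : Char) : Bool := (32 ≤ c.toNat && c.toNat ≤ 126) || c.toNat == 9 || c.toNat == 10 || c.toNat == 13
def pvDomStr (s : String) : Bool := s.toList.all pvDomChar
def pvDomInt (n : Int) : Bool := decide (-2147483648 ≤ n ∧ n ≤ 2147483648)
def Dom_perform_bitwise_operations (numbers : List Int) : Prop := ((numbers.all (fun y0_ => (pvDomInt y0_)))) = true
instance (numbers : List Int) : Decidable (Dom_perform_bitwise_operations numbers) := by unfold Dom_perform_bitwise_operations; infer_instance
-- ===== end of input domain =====

-- ===== PORT A =====
-- B replaces A's single fused loop by a balanced divide-and-conquer reduction (objective: alternative).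
-- Port of A: one loop over numbers[1:] carrying the three accumulators.
def perform_bitwise_operations (numbers : List Int) : Int × Int × Int :=
  match numbers with
  | [] => (0, 0, 0)  -- unreachable under Pre_ (Python raises IndexError on [])
  | h :: _ =>
    (numbers.drop 1).foldl
      (fun (s : Int × Int × Int) num => (PySem.Int.band s.1 num, PySem.Int.bor s.2.1 num, PySem.Int.bxor s.2.2 num))
      (h, h, h)

-- ===== PORT B =====
-- Port of B: balanced divide-and-conquer; split the list in half, recurse, combine the triples.
def pvCombine (p q : Int × Int × Int) : Int × Int × Int :=
  (PySem.Int.band p.1 q.1, PySem.Int.bor p.2.1 q.2.1, PySem.Int.bxor p.2.2 q.2.2)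

def pvReduce3 : List Int → Int × Int × Int
  | [] => (0, 0, 0)  -- unreachable under Pre_ (Python's recursion never terminates on [])
  | [n] => (n, n, n)
  | a :: b :: t =>
    pvCombine (pvReduce3 ((a :: b :: t).take ((a :: b :: t).length / 2)))
              (pvReduce3 ((a :: b :: t).drop ((a :: b :: t).length / 2)))
termination_by xs => xs.length
decreasing_by all_goals simp [List.length_take, List.length_drop]; omega

def perform_bitwise_operations_alt (numbers : List Int) : Int × Int × Int :=
  pvReduce3 numbers

-- ===== PRECONDITION & SPEC =====
-- Pre_ excludes only the empty list, on which A raises IndexError (B also fails to return there).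
def Pre_perform_bitwise_operations (numbers : List Int) : Prop := numbers ≠ []
instance (numbers : List Int) : Decidable (Pre_perform_bitwise_operations numbers) := by
  unfold Pre_perform_bitwise_operations; infer_instance
def pvWitness_perform_bitwise_operations : List Int := [3, 5, 9]

def Spec_perform_bitwise_operations (numbers : List Int) (out : Int × Int × Int) : Prop := out = perform_bitwise_operations_alt numbers
instance (numbers : List Int) (out : Int × Int × Int) : Decidable (Spec_perform_bitwise_operations numbers out) := by unfold Spec_perform_bitwise_operations; infer_instance

-- ===== CLAIM (what is proved, stated in full; the proofs are below) =====
def Claim_equal_perform_bitwise_operations : Prop := ∀ (numbers : List Int), Dom_perform_bitwise_operations numbers → Pre_perform_bitwise_operations numbers → Spec_perform_bitwise_operations numbers (perform_bitwise_operations numbers)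

-- ===== LEMMAS AND PROOFS =====
theorem pv_add_of_and_eq_zero (a : Nat) : ∀ b : Nat, a &&& b = 0 → a + b = a ||| b := by
  induction a using Nat.div2Induction with
  | ind a ih =>
    intro b h
    rcases Nat.eq_zero_or_pos a with h0 | hpos
    · simp [h0]
    have ih2 := ih hpos (b / 2) (by rw [← Nat.and_div_two, h])
    have hor : (a ||| b) / 2 = a / 2 ||| b / 2 := Nat.or_div_two
    have hmodA := Nat.mod_two_eq_zero_or_one a
    have hmodB := Nat.mod_two_eq_zero_or_one b
    have hmodO := Nat.mod_two_eq_zero_or_one (a ||| b)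
    have h1 : ¬ (a % 2 = 1 ∧ b % 2 = 1) := by
      rintro ⟨ha, hb⟩
      have : (a &&& b) % 2 = 1 := Nat.and_mod_two_eq_one.2 ⟨ha, hb⟩
      simp [h] at this
    have h2 : (a ||| b) % 2 = 1 ↔ (a % 2 = 1 ∨ b % 2 = 1) := Nat.or_mod_two_eq_one
    have ea := Nat.div_add_mod a 2
    have eb := Nat.div_add_mod b 2
    have eo := Nat.div_add_mod (a ||| b) 2
    omega

theorem pv_and_ldiff_zero (m n : Nat) : (m &&& n) &&& (m ^^^ (m &&& n)) = 0 := by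
  apply Nat.eq_of_testBit_eq
  intro i
  simp only [Nat.testBit_and, Nat.testBit_xor, Nat.zero_testBit]
  cases m.testBit i <;> cases n.testBit i <;> simp

theorem pv_sub_and (m n : Nat) : m - (m &&& n) = m ^^^ (m &&& n) := by
  have h0 := pv_and_ldiff_zero m n
  have h1 : (m &&& n) + (m ^^^ (m &&& n)) = (m &&& n) ||| (m ^^^ (m &&& n)) :=
    pv_add_of_and_eq_zero _ _ h0
  have h2 : (m &&& n) ||| (m ^^^ (m &&& n)) = m := by
    apply Nat.eq_of_testBit_eq
    intro i
    simp only [Nat.testBit_or, Nat.testBit_xor, Nat.testBit_and]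
    cases m.testBit i <;> cases n.testBit i <;> simp
  omega

theorem pv_testBit_sub_and (m n i : Nat) :
    (m - (m &&& n)).testBit i = (m.testBit i && !(n.testBit i)) := by
  rw [pv_sub_and]
  simp only [Nat.testBit_xor, Nat.testBit_and]
  cases m.testBit i <;> cases n.testBit i <;> simp

def pvTb (a : Int) (i : Nat) : Bool :=
  if 0 ≤ a then a.toNat.testBit i else !((-a - 1).toNat.testBit i)

theorem pvTb_band (a b : Int) (i : Nat) :
    pvTb (PySem.Int.band a b) i = (pvTb a i && pvTb b i) := by
  unfold pvTb PySem.Int.band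
  by_cases ha : 0 ≤ a <;> by_cases hb : 0 ≤ b <;>
    simp only [ha, hb, if_true, if_false]
  · simp [Nat.testBit_and]
  · have h1 : (0:Int) ≤ ↑(a.toNat - (a.toNat &&& (-b - 1).toNat)) := Int.natCast_nonneg _
    simp only [h1, if_true, Int.toNat_natCast, pv_testBit_sub_and]
  · have h1 : (0:Int) ≤ ↑(b.toNat - (b.toNat &&& (-a - 1).toNat)) := Int.natCast_nonneg _
    simp only [h1, if_true, Int.toNat_natCast, pv_testBit_sub_and]
    cases (b.toNat.testBit i) <;> simp
  · have h1 : ¬ (0:Int) ≤ -↑((-a - 1).toNat ||| (-b - 1).toNat) - 1 := by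
      have := Int.natCast_nonneg ((-a - 1).toNat ||| (-b - 1).toNat); omega
    simp only [h1, if_false]
    have h2 : (-(-↑((-a - 1).toNat ||| (-b - 1).toNat) - 1) - 1 : Int).toNat
        = ((-a - 1).toNat ||| (-b - 1).toNat) := by omega
    rw [h2, Nat.testBit_or]
    cases ((-a - 1).toNat.testBit i) <;> cases ((-b - 1).toNat.testBit i) <;> simp

theorem pvTb_bor (a b : Int) (i : Nat) :
    pvTb (PySem.Int.bor a b) i = (pvTb a i || pvTb b i) := by
  unfold pvTb PySem.Int.bor
  by_cases ha : 0 ≤ a <;> by_cases hb : 0 ≤ b <;>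
    simp only [ha, hb, if_true, if_false]
  · simp [Nat.testBit_or]
  · have h1 : ¬ (0:Int) ≤ -↑((-b - 1).toNat - ((-b - 1).toNat &&& a.toNat)) - 1 := by
      have := Int.natCast_nonneg ((-b - 1).toNat - ((-b - 1).toNat &&& a.toNat)); omega
    simp only [h1, if_false]
    have h2 : (-(-↑((-b - 1).toNat - ((-b - 1).toNat &&& a.toNat)) - 1) - 1 : Int).toNat
        = (-b - 1).toNat - ((-b - 1).toNat &&& a.toNat) := by omega
    rw [h2, pv_testBit_sub_and]
    cases ((-b - 1).toNat.testBit i) <;> cases (a.toNat.testBit i) <;> simp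
  · have h1 : ¬ (0:Int) ≤ -↑((-a - 1).toNat - ((-a - 1).toNat &&& b.toNat)) - 1 := by
      have := Int.natCast_nonneg ((-a - 1).toNat - ((-a - 1).toNat &&& b.toNat)); omega
    simp only [h1, if_false]
    have h2 : (-(-↑((-a - 1).toNat - ((-a - 1).toNat &&& b.toNat)) - 1) - 1 : Int).toNat
        = (-a - 1).toNat - ((-a - 1).toNat &&& b.toNat) := by omega
    rw [h2, pv_testBit_sub_and]
    cases ((-a - 1).toNat.testBit i) <;> cases (b.toNat.testBit i) <;> simp
  · have h1 : ¬ (0:Int) ≤ -↑((-a - 1).toNat &&& (-b - 1).toNat) - 1 := by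
      have := Int.natCast_nonneg ((-a - 1).toNat &&& (-b - 1).toNat); omega
    simp only [h1, if_false]
    have h2 : (-(-↑((-a - 1).toNat &&& (-b - 1).toNat) - 1) - 1 : Int).toNat
        = ((-a - 1).toNat &&& (-b - 1).toNat) := by omega
    rw [h2, Nat.testBit_and]
    cases ((-a - 1).toNat.testBit i) <;> cases ((-b - 1).toNat.testBit i) <;> simp

theorem pvTb_bxor (a b : Int) (i : Nat) :
    pvTb (PySem.Int.bxor a b) i = (pvTb a i).xor (pvTb b i) := by
  unfold pvTb PySem.Int.bxor
  by_cases ha : 0 ≤ a <;> by_cases hb : 0 ≤ b <;>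
    simp only [ha, hb, if_true, if_false]
  · simp [Nat.testBit_xor]
  · have h1 : ¬ (0:Int) ≤ -↑(a.toNat ^^^ (-b - 1).toNat) - 1 := by
      have := Int.natCast_nonneg (a.toNat ^^^ (-b - 1).toNat); omega
    simp only [h1, if_false]
    have h2 : (-(-↑(a.toNat ^^^ (-b - 1).toNat) - 1) - 1 : Int).toNat
        = a.toNat ^^^ (-b - 1).toNat := by omega
    rw [h2, Nat.testBit_xor]
    cases (a.toNat.testBit i) <;> cases ((-b - 1).toNat.testBit i) <;> simp
  · have h1 : ¬ (0:Int) ≤ -↑((-a - 1).toNat ^^^ b.toNat) - 1 := by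
      have := Int.natCast_nonneg ((-a - 1).toNat ^^^ b.toNat); omega
    simp only [h1, if_false]
    have h2 : (-(-↑((-a - 1).toNat ^^^ b.toNat) - 1) - 1 : Int).toNat
        = (-a - 1).toNat ^^^ b.toNat := by omega
    rw [h2, Nat.testBit_xor]
    cases ((-a - 1).toNat.testBit i) <;> cases (b.toNat.testBit i) <;> simp
  · have h1 : (0:Int) ≤ ↑((-a - 1).toNat ^^^ (-b - 1).toNat) := Int.natCast_nonneg _
    simp only [h1, if_true, Int.toNat_natCast, Nat.testBit_xor]
    cases ((-a - 1).toNat.testBit i) <;> cases ((-b - 1).toNat.testBit i) <;> simp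

theorem pvTb_inj (a b : Int) (h : ∀ i, pvTb a i = pvTb b i) : a = b := by
  unfold pvTb at h
  by_cases ha : 0 ≤ a <;> by_cases hb : 0 ≤ b <;> simp only [ha, hb, if_true, if_false] at h
  · have := Nat.eq_of_testBit_eq h; omega
  · exfalso
    have hi := h (a.toNat + (-b - 1).toNat)
    have h1 : a.toNat.testBit (a.toNat + (-b - 1).toNat) = false :=
      Nat.testBit_lt_two_pow (by calc a.toNat < 2 ^ a.toNat := Nat.lt_two_pow_self
        _ ≤ 2 ^ (a.toNat + (-b - 1).toNat) := Nat.pow_le_pow_right (by omega) (by omega))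
    have h2 : (-b - 1).toNat.testBit (a.toNat + (-b - 1).toNat) = false :=
      Nat.testBit_lt_two_pow (by calc (-b - 1).toNat < 2 ^ (-b - 1).toNat := Nat.lt_two_pow_self
        _ ≤ 2 ^ (a.toNat + (-b - 1).toNat) := Nat.pow_le_pow_right (by omega) (by omega))
    rw [h1, h2] at hi; simp at hi
  · exfalso
    have hi := h (b.toNat + (-a - 1).toNat)
    have h1 : b.toNat.testBit (b.toNat + (-a - 1).toNat) = false :=
      Nat.testBit_lt_two_pow (by calc b.toNat < 2 ^ b.toNat := Nat.lt_two_pow_self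
        _ ≤ 2 ^ (b.toNat + (-a - 1).toNat) := Nat.pow_le_pow_right (by omega) (by omega))
    have h2 : (-a - 1).toNat.testBit (b.toNat + (-a - 1).toNat) = false :=
      Nat.testBit_lt_two_pow (by calc (-a - 1).toNat < 2 ^ (-a - 1).toNat := Nat.lt_two_pow_self
        _ ≤ 2 ^ (b.toNat + (-a - 1).toNat) := Nat.pow_le_pow_right (by omega) (by omega))
    rw [h1, h2] at hi; simp at hi
  · have : (-a - 1).toNat = (-b - 1).toNat :=
      Nat.eq_of_testBit_eq (fun i => by have := h i; cases hx : (-a-1).toNat.testBit i <;> cases hy : (-b-1).toNat.testBit i <;> simp_all)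
    omega

theorem pv_band_assoc (a b c : Int) :
    PySem.Int.band (PySem.Int.band a b) c = PySem.Int.band a (PySem.Int.band b c) := by
  apply pvTb_inj; intro i
  simp only [pvTb_band, Bool.and_assoc]

theorem pv_bor_assoc (a b c : Int) :
    PySem.Int.bor (PySem.Int.bor a b) c = PySem.Int.bor a (PySem.Int.bor b c) := by
  apply pvTb_inj; intro i
  simp only [pvTb_bor, Bool.or_assoc]

theorem pv_bxor_assoc (a b c : Int) :
    PySem.Int.bxor (PySem.Int.bxor a b) c = PySem.Int.bxor a (PySem.Int.bxor b c) := by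
  apply pvTb_inj; intro i
  simp only [pvTb_bxor, Bool.xor_assoc]

theorem pv_foldl_assoc (op : Int → Int → Int)
    (hop : ∀ x y z, op (op x y) z = op x (op y z)) (l : List Int) :
    ∀ a b, l.foldl op (op a b) = op a (l.foldl op b) := by
  induction l with
  | nil => intro a b; rfl
  | cons h t ih => intro a b; simpa [List.foldl, hop] using ih a (op b h)

theorem pv_foldl_split (op : Int → Int → Int)
    (hop : ∀ x y z, op (op x y) z = op x (op y z))
    (h1 : Int) (t1 : List Int) (h2 : Int) (t2 : List Int) :
    (t1 ++ h2 :: t2).foldl op h1 = op (t1.foldl op h1) (t2.foldl op h2) := by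
  rw [List.foldl_append, List.foldl_cons, pv_foldl_assoc op hop]

-- the componentwise description both ports are reduced to
def pvFolds (h : Int) (t : List Int) : Int × Int × Int :=
  (t.foldl PySem.Int.band h, t.foldl PySem.Int.bor h, t.foldl PySem.Int.bxor h)

theorem pv_fused_eq_folds (t : List Int) :
    ∀ (a o x : Int),
      t.foldl (fun (s : Int × Int × Int) num => (PySem.Int.band s.1 num, PySem.Int.bor s.2.1 num, PySem.Int.bxor s.2.2 num)) (a, o, x)
        = (t.foldl PySem.Int.band a, t.foldl PySem.Int.bor o, t.foldl PySem.Int.bxor x) := by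
  induction t with
  | nil => intro a o x; rfl
  | cons h t ih =>
    intro a o x
    simpa [List.foldl] using ih (PySem.Int.band a h) (PySem.Int.bor o h) (PySem.Int.bxor x h)

theorem pv_reduce3_eq_folds : ∀ (xs : List Int), xs ≠ [] → pvReduce3 xs = pvFolds xs.head! xs.tail := by
  intro xs
  induction xs using pvReduce3.induct with
  | case1 => intro hx; cases hx rfl
  | case2 n => intro _; simp [pvReduce3, pvFolds]
  | case3 a b t ih1 ih2 =>
    intro _
    rw [pvReduce3]
    have hlen : (a :: b :: t).length = t.length + 2 := by simp
    generalize hk : (a :: b :: t).length / 2 = k at ih1 ih2 ⊢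
    obtain ⟨k', rfl⟩ : ∃ k', k = k' + 1 := ⟨k - 1, by omega⟩
    have htake : (a :: b :: t).take (k' + 1) = a :: (b :: t).take k' := by
      simp
    have hdropne : (a :: b :: t).drop (k' + 1) ≠ [] := by
      simp [List.drop_eq_nil_iff]; omega
    obtain ⟨h2, t2, hdrop⟩ := List.exists_cons_of_ne_nil hdropne
    have hsplit : (b :: t) = (b :: t).take k' ++ h2 :: t2 := by
      have := List.take_append_drop (k' + 1) (a :: b :: t)
      rw [htake, hdrop] at this
      exact (List.cons_inj_right a).mp this.symm
    rw [ih1 (by rw [htake]; simp), ih2 (by rw [hdrop]; simp)]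
    rw [htake, hdrop]
    simp only [List.head!_cons, List.tail_cons]
    unfold pvFolds pvCombine
    refine Prod.ext ?_ (Prod.ext ?_ ?_) <;> simp only [] <;> (conv_rhs => rw [hsplit])
    · exact (pv_foldl_split _ pv_band_assoc a _ h2 t2).symm
    · exact (pv_foldl_split _ pv_bor_assoc a _ h2 t2).symm
    · exact (pv_foldl_split _ pv_bxor_assoc a _ h2 t2).symm

-- ===== VERDICT (by name: the statement is the Claim_ definition above) =====
theorem perform_bitwise_operations_spec : Claim_equal_perform_bitwise_operations := by
  intro numbers _ hpre
  unfold Spec_perform_bitwise_operations perform_bitwise_operations perform_bitwise_operations_alt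
  match numbers with
  | [] => exact absurd rfl hpre
  | h :: t =>
    rw [pv_reduce3_eq_folds (h :: t) (by simp)]
    simpa [pvFolds] using pv_fused_eq_folds t h h h
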